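-- pv_equiv track=rewrite | github.com/zydex/janestreetpuzzles | Block Party 4/solve.py | getTaxicab
-- ===== SOURCE A (Python) =====
-- def taxicabDistance(p, q):
--     # sum of absolute difference between coordinates
--     distance = 0
--     for p_i,q_i in zip(p,q):
--         distance += abs(p_i - q_i)
--     return distance
--
-- def getTaxicab(coord, radius):
--     coordinates = []
--     excluded = []
--     for i in range(coord[0]-radius,coord[0]+radius+1):
--         for j in range(coord[1]-radius,coord[1]+radius+1):
--             if taxicabDistance(coord, (i,j)) == radius and i < 10 and j < 10 and i > -1 and j > -1 and (i,j) != coord: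
--                 coordinates.append((i,j))
--             elif taxicabDistance(coord, (i,j)) < radius and i < 10 and j < 10 and i > -1 and j > -1 and (i,j) != coord:
--                 excluded.append((i,j))
--     return coordinates, excluded
-- ===== SOURCE B (Python) =====
-- def getTaxicab(coord, radius):
--     # Walk only the rows of the 10x10 board inside the diamond; each row contributes
--     # its two perimeter cells and its contiguous interior span directly.
--     c0, c1 = coord
--     coordinates = []
--     excluded = []
--     for i in range(max(0, c0 - radius), min(9, c0 + radius) + 1):
--         rem = radius - abs(i - c0)
--         perim = [c1] if rem == 0 else [c1 - rem, c1 + rem]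
--         for j in perim:
--             if 0 <= j <= 9 and (i, j) != coord:
--                 coordinates.append((i, j))
--         for j in range(max(0, c1 - rem + 1), min(9, c1 + rem - 1) + 1):
--             if (i, j) != coord:
--                 excluded.append((i, j))
--     return coordinates, excluded
-- ===== Notes on version B (the rewrite author's own statement) =====
-- stated objective: faster
-- what changed: A scans the whole (2*radius+1)^2 bounding box of the diamond testing the taxicab distance of every cell; B walks only the at most 10 board rows that meet the diamond and emits each row's two perimeter cells and its clipped interior span directly, with no distance test.
import Mathlib
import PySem

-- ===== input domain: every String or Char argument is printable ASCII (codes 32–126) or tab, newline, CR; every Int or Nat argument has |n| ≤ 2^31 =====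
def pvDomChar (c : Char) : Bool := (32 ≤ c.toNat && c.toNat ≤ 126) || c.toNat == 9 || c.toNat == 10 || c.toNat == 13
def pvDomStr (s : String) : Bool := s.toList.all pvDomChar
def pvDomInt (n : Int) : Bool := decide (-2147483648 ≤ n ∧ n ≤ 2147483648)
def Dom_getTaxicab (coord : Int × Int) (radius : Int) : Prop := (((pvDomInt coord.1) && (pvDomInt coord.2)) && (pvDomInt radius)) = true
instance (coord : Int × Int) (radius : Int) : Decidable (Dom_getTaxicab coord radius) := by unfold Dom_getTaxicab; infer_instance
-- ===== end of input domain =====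

-- B walks only the ≤10 board rows that meet the diamond and emits each row's two
-- perimeter cells and clipped interior span directly (O(1) in radius), instead of
-- A's scan of the whole (2r+1)^2 bounding box with a distance test per cell.

-- ===== PORT A =====
def taxicabDistance (p : Int × Int) (q : Int × Int) : Int :=
  -- Python: distance = 0; for p_i, q_i in zip(p, q): distance += abs(p_i - q_i)
  [(p.1, q.1), (p.2, q.2)].foldl (fun d x => d + |x.1 - x.2|) 0

def getTaxicab (coord : Int × Int) (radius : Int) : (List (Int × Int)) × (List (Int × Int)) :=
  (PySem.List.pyRange (coord.1 - radius) (coord.1 + radius + 1) 1).foldl (fun acc i =>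
    (PySem.List.pyRange (coord.2 - radius) (coord.2 + radius + 1) 1).foldl (fun acc j =>
      if taxicabDistance coord (i, j) = radius ∧ i < 10 ∧ j < 10 ∧ i > -1 ∧ j > -1 ∧ (i, j) ≠ coord then
        (acc.1 ++ [(i, j)], acc.2)
      else if taxicabDistance coord (i, j) < radius ∧ i < 10 ∧ j < 10 ∧ i > -1 ∧ j > -1 ∧ (i, j) ≠ coord then
        (acc.1, acc.2 ++ [(i, j)])
      else acc) acc) ([], [])

-- ===== PORT B =====
def getTaxicab_alt (coord : Int × Int) (radius : Int) : (List (Int × Int)) × (List (Int × Int)) :=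
  (PySem.List.pyRange (max 0 (coord.1 - radius)) (min 9 (coord.1 + radius) + 1) 1).foldl (fun acc i =>
    let rem := radius - |i - coord.1|
    let perim := if rem = 0 then [coord.2] else [coord.2 - rem, coord.2 + rem]
    (perim.foldl (fun a j => if 0 ≤ j ∧ j ≤ 9 ∧ (i, j) ≠ coord then a ++ [(i, j)] else a) acc.1,
     (PySem.List.pyRange (max 0 (coord.2 - rem + 1)) (min 9 (coord.2 + rem - 1) + 1) 1).foldl
       (fun a j => if (i, j) ≠ coord then a ++ [(i, j)] else a) acc.2)) ([], [])

-- ===== PRECONDITION & SPEC =====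
def Spec_getTaxicab (coord : Int × Int) (radius : Int) (out : (List (Int × Int)) × (List (Int × Int))) : Prop := out = getTaxicab_alt coord radius
instance (coord : Int × Int) (radius : Int) (out : (List (Int × Int)) × (List (Int × Int))) : Decidable (Spec_getTaxicab coord radius out) := by unfold Spec_getTaxicab; infer_instance

-- ===== CLAIM (what is proved, stated in full; the proofs are below) =====
def Claim_equal_getTaxicab : Prop := ∀ (coord : Int × Int) (radius : Int), Dom_getTaxicab coord radius → Spec_getTaxicab coord radius (getTaxicab coord radius)

-- ===== LEMMAS AND PROOFS =====

theorem pv_flatMap_shrink {α : Type} (a b lo hi : Int) (f : Int → List α)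
    (hsub : ∀ j, lo ≤ j → j < hi → a ≤ j ∧ j < b)
    (hz : ∀ j, a ≤ j → j < b → (j < lo ∨ hi ≤ j) → f j = []) :
    (PySem.List.pyRange a b 1).flatMap f = (PySem.List.pyRange lo hi 1).flatMap f := by
  rcases (by omega : hi ≤ lo ∨ lo < hi) with h | h
  · rw [PySem.List.pyRange_one_eq_nil h, List.flatMap_nil]
    refine List.flatMap_eq_nil_iff.mpr (fun j hj => ?_)
    rw [PySem.List.mem_pyRange_one] at hj
    exact hz j hj.1 hj.2 (by omega)
  · obtain ⟨ha, -⟩ := hsub lo le_rfl h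
    obtain ⟨-, hb⟩ := hsub (hi - 1) (by omega) (by omega)
    rw [PySem.List.pyRange_one_append a lo b ha (by omega),
        PySem.List.pyRange_one_append lo hi b (by omega) (by omega),
        List.flatMap_append, List.flatMap_append]
    have z1 : (PySem.List.pyRange a lo 1).flatMap f = [] :=
      List.flatMap_eq_nil_iff.mpr (fun j hj => by
        rw [PySem.List.mem_pyRange_one] at hj; exact hz j hj.1 (by omega) (by omega))
    have z2 : (PySem.List.pyRange hi b 1).flatMap f = [] :=
      List.flatMap_eq_nil_iff.mpr (fun j hj => by
        rw [PySem.List.mem_pyRange_one] at hj; exact hz j (by omega) hj.2 (by omega))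
    simp [z1, z2]

theorem pv_filter_interval (a b lo hi : Int) (Q : Int → Prop) [DecidablePred Q]
    (hsub : ∀ j, lo ≤ j → j < hi → a ≤ j ∧ j < b) :
    (PySem.List.pyRange a b 1).filter (fun j => decide ((lo ≤ j ∧ j < hi) ∧ Q j))
    = (PySem.List.pyRange lo hi 1).filter (fun j => decide (Q j)) := by
  rcases (by omega : hi ≤ lo ∨ lo < hi) with h | h
  · rw [PySem.List.pyRange_one_eq_nil h, List.filter_nil]
    refine List.filter_eq_nil_iff.mpr (fun j hj => ?_)
    simp only [decide_eq_true_eq]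
    rintro ⟨⟨h1, h2⟩, -⟩; omega
  · obtain ⟨ha, -⟩ := hsub lo le_rfl h
    obtain ⟨-, hb⟩ := hsub (hi - 1) (by omega) (by omega)
    rw [PySem.List.pyRange_one_append a lo b ha (by omega),
        PySem.List.pyRange_one_append lo hi b (by omega) (by omega),
        List.filter_append, List.filter_append]
    have z1 : (PySem.List.pyRange a lo 1).filter (fun j => decide ((lo ≤ j ∧ j < hi) ∧ Q j)) = [] :=
      List.filter_eq_nil_iff.mpr (fun j hj => by
        rw [PySem.List.mem_pyRange_one] at hj
        simp only [decide_eq_true_eq]; rintro ⟨⟨h1, h2⟩, -⟩; omega)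
    have z2 : (PySem.List.pyRange hi b 1).filter (fun j => decide ((lo ≤ j ∧ j < hi) ∧ Q j)) = [] :=
      List.filter_eq_nil_iff.mpr (fun j hj => by
        rw [PySem.List.mem_pyRange_one] at hj
        simp only [decide_eq_true_eq]; rintro ⟨⟨h1, h2⟩, -⟩; omega)
    have zmid : (PySem.List.pyRange lo hi 1).filter (fun j => decide ((lo ≤ j ∧ j < hi) ∧ Q j))
        = (PySem.List.pyRange lo hi 1).filter (fun j => decide (Q j)) := by
      refine List.filter_congr (fun j hj => ?_)
      rw [PySem.List.mem_pyRange_one] at hj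
      exact decide_eq_decide.mpr ⟨fun h' => h'.2, fun h' => ⟨⟨hj.1, hj.2⟩, h'⟩⟩
    rw [z1, z2, zmid]; simp

theorem pv_filter_single (a b x : Int) (Q : Int → Prop) [DecidablePred Q] :
    (PySem.List.pyRange a b 1).filter (fun j => decide (j = x ∧ Q j))
    = if a ≤ x ∧ x < b ∧ Q x then [x] else [] := by
  rcases (by omega : b ≤ a ∨ a < b) with hab | hab
  · rw [PySem.List.pyRange_one_eq_nil hab, List.filter_nil, if_neg]
    rintro ⟨h1, h2, -⟩; omega
  · rw [PySem.List.pyRange_one_cons hab, List.filter_cons, pv_filter_single (a + 1) b x Q]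
    by_cases hax : a = x
    · subst hax
      by_cases hq : Q a
      · rw [if_pos (by simp [hq]), if_neg (by rintro ⟨h1, -⟩; omega),
            if_pos ⟨le_rfl, hab, hq⟩]
      · rw [if_neg (by simp [hq]), if_neg (by rintro ⟨h1, -⟩; omega),
            if_neg (by rintro ⟨-, -, h3⟩; exact hq h3)]
    · rw [if_neg (by simp; intro h; exact absurd h hax)]
      exact if_congr ⟨fun h' => ⟨by omega, h'.2⟩, fun h' => ⟨by omega, h'.2⟩⟩ rfl rfl
termination_by (b - a).toNat
decreasing_by omega

theorem pv_filter_two (a b x y : Int) (Q : Int → Prop) [DecidablePred Q] (hxy : x ≤ y) :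
    (PySem.List.pyRange a b 1).filter (fun j => decide ((j = x ∨ j = y) ∧ Q j))
    = (if a ≤ x ∧ x < b ∧ Q x then [x] else [])
      ++ (if x < y ∧ a ≤ y ∧ y < b ∧ Q y then [y] else []) := by
  rcases (by omega : x = y ∨ x < y) with rfl | hlt
  · have e : (PySem.List.pyRange a b 1).filter (fun j => decide ((j = x ∨ j = x) ∧ Q j))
        = (PySem.List.pyRange a b 1).filter (fun j => decide (j = x ∧ Q j)) := by
      refine List.filter_congr (fun j _ => decide_eq_decide.mpr ?_)
      constructor
      · rintro ⟨h | h, hq⟩ <;> exact ⟨h, hq⟩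
      · rintro ⟨h, hq⟩; exact ⟨Or.inl h, hq⟩
    rw [e, pv_filter_single,
        show (if x < x ∧ a ≤ x ∧ x < b ∧ Q x then [x] else ([] : List Int)) = []
          from if_neg (by rintro ⟨h, -⟩; omega),
        List.append_nil]
  · set m : Int := max a (min y b) with hm
    have hax : ∀ j, a ≤ j → j < m → (decide ((j = x ∨ j = y) ∧ Q j)) = (decide (j = x ∧ Q j)) := by
      intro j h1 h2
      refine decide_eq_decide.mpr ⟨?_, fun h' => ⟨Or.inl h'.1, h'.2⟩⟩
      rintro ⟨h | h, hq⟩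
      · exact ⟨h, hq⟩
      · exfalso; omega
    have hay : ∀ j, m ≤ j → j < b → (decide ((j = x ∨ j = y) ∧ Q j)) = (decide (j = y ∧ Q j)) := by
      intro j h1 h2
      refine decide_eq_decide.mpr ⟨?_, fun h' => ⟨Or.inr h'.1, h'.2⟩⟩
      rintro ⟨h | h, hq⟩
      · exfalso; omega
      · exact ⟨h, hq⟩
    rcases (by omega : b ≤ a ∨ a < b) with hab | hab
    · rw [PySem.List.pyRange_one_eq_nil hab, List.filter_nil,
          if_neg (by rintro ⟨h1, h2, -⟩; omega), if_neg (by rintro ⟨-, h1, h2, -⟩; omega)]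
      rfl
    · rw [PySem.List.pyRange_one_append a m b (by omega) (by omega), List.filter_append]
      have e1 : (PySem.List.pyRange a m 1).filter (fun j => decide ((j = x ∨ j = y) ∧ Q j))
          = (PySem.List.pyRange a m 1).filter (fun j => decide (j = x ∧ Q j)) :=
        List.filter_congr (fun j hj => by
          rw [PySem.List.mem_pyRange_one] at hj; exact hax j hj.1 hj.2)
      have e2 : (PySem.List.pyRange m b 1).filter (fun j => decide ((j = x ∨ j = y) ∧ Q j))
          = (PySem.List.pyRange m b 1).filter (fun j => decide (j = y ∧ Q j)) :=
        List.filter_congr (fun j hj => by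
          rw [PySem.List.mem_pyRange_one] at hj; exact hay j hj.1 hj.2)
      rw [e1, e2, pv_filter_single, pv_filter_single]
      have c1 : (a ≤ x ∧ x < m ∧ Q x) ↔ (a ≤ x ∧ x < b ∧ Q x) := by
        constructor <;> rintro ⟨h1, h2, h3⟩ <;> exact ⟨h1, by omega, h3⟩
      have c2 : (m ≤ y ∧ y < b ∧ Q y) ↔ (x < y ∧ a ≤ y ∧ y < b ∧ Q y) := by
        constructor
        · rintro ⟨h1, h2, h3⟩; exact ⟨hlt, by omega, h2, h3⟩
        · rintro ⟨-, h1, h2, h3⟩; exact ⟨by omega, h2, h3⟩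
      rw [if_congr c1 rfl rfl, if_congr c2 rfl rfl]

theorem pv_foldl_two {α β : Type} (p q : β → Prop) [DecidablePred p] [DecidablePred q]
    (g : β → α) (l : List β) (acc : List α × List α) :
    l.foldl (fun a x => if p x then (a.1 ++ [g x], a.2) else if q x then (a.1, a.2 ++ [g x]) else a) acc
    = (acc.1 ++ (l.filter (fun x => decide (p x))).map g,
       acc.2 ++ (l.filter (fun x => decide (¬ p x ∧ q x))).map g) := by
  induction l generalizing acc with
  | nil => simp
  | cons x t ih => by_cases hp : p x <;> by_cases hq : q x <;> simp [ih, hp, hq]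

theorem pv_foldl_pair_append {α β : Type} (u v : β → List α) (l : List β) (acc : List α × List α) :
    l.foldl (fun a i => (a.1 ++ u i, a.2 ++ v i)) acc = (acc.1 ++ l.flatMap u, acc.2 ++ l.flatMap v) := by
  induction l generalizing acc with
  | nil => simp
  | cons x t ih => simp [ih]

theorem pv_main (c0 c1 r : Int) : getTaxicab (c0, c1) r = getTaxicab_alt (c0, c1) r := by
  simp only [getTaxicab, getTaxicab_alt, taxicabDistance, List.foldl_cons, List.foldl_nil, zero_add]
  simp only [pv_foldl_two, PySem.List.foldl_append_ite]
  simp only [pv_foldl_pair_append, List.nil_append]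
  refine congrArg₂ Prod.mk ?_ ?_
  · -- first components: perimeter cells
    rw [pv_flatMap_shrink (c0 - r) (c0 + r + 1) (max 0 (c0 - r)) (min 9 (c0 + r) + 1) _
          (fun j h1 h2 => by omega)
          (fun j hj1 hj2 hor => by
            rw [List.filter_eq_nil_iff.mpr (fun x hx => by
              simp only [decide_eq_true_eq]; rintro ⟨-, h10, -, hneg, -⟩; omega), List.map_nil])]
    refine List.flatMap_congr (fun i hi => ?_)
    rw [PySem.List.mem_pyRange_one] at hi
    have habs0 : (0 : Int) ≤ |i - c0| := abs_nonneg _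
    have habs : |i - c0| ≤ r := by rcases abs_cases (i - c0) with ⟨e, -⟩ | ⟨e, -⟩ <;> omega
    refine congrArg (List.map (Prod.mk i)) ?_
    have ecov : (PySem.List.pyRange (c1 - r) (c1 + r + 1) 1).filter
          (fun x => decide (|c0 - i| + |c1 - x| = r ∧ i < 10 ∧ x < 10 ∧ i > -1 ∧ x > -1 ∧ (i, x) ≠ (c0, c1)))
        = (PySem.List.pyRange (c1 - r) (c1 + r + 1) 1).filter
          (fun x => decide ((x = c1 - (r - |i - c0|) ∨ x = c1 + (r - |i - c0|))
              ∧ (0 ≤ x ∧ x ≤ 9 ∧ (i, x) ≠ (c0, c1)))) := by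
      refine List.filter_congr (fun j _ => decide_eq_decide.mpr ?_)
      rw [abs_sub_comm c0 i]
      rcases abs_cases (i - c0) with ⟨e1, s1⟩ | ⟨e1, s1⟩ <;>
        rcases abs_cases (c1 - j) with ⟨e2, s2⟩ | ⟨e2, s2⟩ <;>
        · constructor
          · rintro ⟨h1, h2, h3, h4, h5, hN⟩; exact ⟨by omega, by omega, by omega, hN⟩
          · rintro ⟨hxy', h0, h9', hN⟩
            exact ⟨by rcases hxy' with h | h <;> omega, by omega, by omega, by omega, by omega, hN⟩
    rw [ecov, pv_filter_two (c1 - r) (c1 + r + 1) _ _ _ (by omega)]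
    by_cases hrem : r - |i - c0| = 0
    · rw [if_pos hrem, hrem, List.filter_singleton]
      simp only [sub_zero, add_zero, Bool.cond_decide]
      rw [show (if c1 < c1 ∧ c1 - r ≤ c1 ∧ c1 < c1 + r + 1 ∧ (0 ≤ c1 ∧ c1 ≤ 9 ∧ (i, c1) ≠ (c0, c1)) then [c1]
            else ([] : List Int)) = [] from if_neg (by rintro ⟨h, -⟩; omega), List.append_nil]
      exact if_congr ⟨fun h => h.2.2, fun h => ⟨by omega, by omega, h⟩⟩ rfl rfl
    · rw [if_neg hrem,
          show ([c1 - (r - |i - c0|), c1 + (r - |i - c0|)] : List Int)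
            = [c1 - (r - |i - c0|)] ++ [c1 + (r - |i - c0|)] from rfl,
          List.filter_append, List.filter_singleton, List.filter_singleton]
      simp only [Bool.cond_decide]
      congr 1
      · exact if_congr ⟨fun h => h.2.2, fun h => ⟨by omega, by omega, h⟩⟩ rfl rfl
      · exact if_congr ⟨fun h => h.2.2.2, fun h => ⟨by omega, by omega, by omega, h⟩⟩ rfl rfl
  · -- second components: interior cells
    rw [pv_flatMap_shrink (c0 - r) (c0 + r + 1) (max 0 (c0 - r)) (min 9 (c0 + r) + 1) _
          (fun j h1 h2 => by omega)
          (fun j hj1 hj2 hor => by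
            rw [List.filter_eq_nil_iff.mpr (fun x hx => by
              simp only [decide_eq_true_eq]; rintro ⟨-, -, h10, -, hneg, -⟩; omega), List.map_nil])]
    refine List.flatMap_congr (fun i hi => ?_)
    rw [PySem.List.mem_pyRange_one] at hi
    have habs0 : (0 : Int) ≤ |i - c0| := abs_nonneg _
    have habs : |i - c0| ≤ r := by rcases abs_cases (i - c0) with ⟨e, -⟩ | ⟨e, -⟩ <;> omega
    refine congrArg (List.map (Prod.mk i)) ?_
    have ecov : (PySem.List.pyRange (c1 - r) (c1 + r + 1) 1).filter
          (fun x => decide (¬(|c0 - i| + |c1 - x| = r ∧ i < 10 ∧ x < 10 ∧ i > -1 ∧ x > -1 ∧ (i, x) ≠ (c0, c1))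
            ∧ |c0 - i| + |c1 - x| < r ∧ i < 10 ∧ x < 10 ∧ i > -1 ∧ x > -1 ∧ (i, x) ≠ (c0, c1)))
        = (PySem.List.pyRange (c1 - r) (c1 + r + 1) 1).filter
          (fun x => decide ((max 0 (c1 - (r - |i - c0|) + 1) ≤ x ∧ x < min 9 (c1 + (r - |i - c0|) - 1) + 1)
              ∧ (i, x) ≠ (c0, c1))) := by
      refine List.filter_congr (fun j _ => decide_eq_decide.mpr ?_)
      rw [abs_sub_comm c0 i]
      rcases abs_cases (i - c0) with ⟨e1, s1⟩ | ⟨e1, s1⟩ <;>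
        rcases abs_cases (c1 - j) with ⟨e2, s2⟩ | ⟨e2, s2⟩ <;>
        · constructor
          · rintro ⟨-, h1, h2, h3, h4, h5, hN⟩; exact ⟨⟨by omega, by omega⟩, hN⟩
          · rintro ⟨⟨hl, hh⟩, hN⟩
            refine ⟨fun hc => absurd hc.1 (by omega), by omega, by omega, by omega, by omega, by omega, hN⟩
    rw [ecov, pv_filter_interval _ _ _ _ _ (fun j h1 h2 => by omega)]

-- ===== VERDICT (by name: the statement is the Claim_ definition above) =====
theorem getTaxicab_spec : Claim_equal_getTaxicab := by
  intro coord radius _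
  unfold Spec_getTaxicab
  obtain ⟨c0, c1⟩ := coord
  exact pv_main c0 c1 radius
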